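-- pv_equiv track=rewrite | github.com/harmslab/gpmap | gpmap/utils.py | mutations_to_genotypes
-- ===== SOURCE A (Python) =====
-- import itertools as it
--
-- def mutations_to_genotypes(mutations, wildtype=None):
--     """Use a mutations dictionary to construct an array of genotypes composed
--     of those mutations.
--
--     Parameters
--     ----------
--     mutations : dict
--         A mapping dict with site numbers as keys and lists of mutations as
--         values.
--
--     wildtype : str
--         wildtype genotype (as string).
--
--     Returns
--     -------
--     genotypes : list
--         list of genotypes comprised of mutations in given dictionary.
--     """
--     # Convert mutations dict to list of lists
--     mutations_ = []
--     for i, val in enumerate(mutations.values()):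
--         if val is None:
--             mutations_.append(wildtype[i])
--         else:
--             mutations_.append(val)
--     sequences = it.product(*mutations_)
--     genotypes = ["".join(s) for s in sequences]
--     return genotypes
-- ===== SOURCE B (Python) =====
-- def mutations_to_genotypes(mutations, wildtype=None):
--     """Rank-decoding enumeration: each genotype is obtained from its rank k by
--     mixed-radix div/mod decomposition, not by building the product list."""
--     groups = [val if val is not None else wildtype[i]
--               for i, val in enumerate(mutations.values())]
--
--     def decode(gs, k):
--         if not gs:
--             return ""
--         t = 1
--         for h in gs[1:]:
--             t *= len(h)
--         return gs[0][k // t] + decode(gs[1:], k % t)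
--
--     total = 1
--     for g in groups:
--         total *= len(g)
--     return [decode(groups, k) for k in range(total)]
-- ===== Notes on version B (the rewrite author's own statement) =====
-- stated objective: alternative
-- what changed: Replaces building the Cartesian product (itertools.product plus a join pass) with rank decoding: it computes the total count as the product of group sizes and maps each rank k in range(total) directly to its genotype by mixed-radix div/mod decomposition of k.
import Mathlib
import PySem

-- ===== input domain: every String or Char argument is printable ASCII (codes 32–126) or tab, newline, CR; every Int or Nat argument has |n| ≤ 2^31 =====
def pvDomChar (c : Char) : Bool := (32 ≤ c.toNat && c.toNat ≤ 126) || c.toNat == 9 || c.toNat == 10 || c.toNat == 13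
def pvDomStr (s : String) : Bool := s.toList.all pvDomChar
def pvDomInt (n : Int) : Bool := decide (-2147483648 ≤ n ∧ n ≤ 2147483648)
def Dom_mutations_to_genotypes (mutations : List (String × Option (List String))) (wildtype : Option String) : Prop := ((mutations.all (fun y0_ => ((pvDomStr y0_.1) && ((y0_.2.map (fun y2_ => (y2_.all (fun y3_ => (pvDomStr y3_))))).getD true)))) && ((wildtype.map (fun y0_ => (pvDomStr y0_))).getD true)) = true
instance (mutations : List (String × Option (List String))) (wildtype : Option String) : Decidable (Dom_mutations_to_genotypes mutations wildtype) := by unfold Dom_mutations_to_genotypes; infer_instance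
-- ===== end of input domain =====

-- B enumerates genotypes by mixed-radix rank decoding (total count + div/mod decomposition of
-- each rank) instead of itertools.product plus a join pass; equivalence is about the return
-- value (neither program mutates its arguments).

-- ===== PORT A =====
-- wildtype[i]: a 1-char string; defaulted to ' ' only outside Pre_ (where Python raises)
def pvSiteA (wildtype : Option String) (i : Nat) (val : Option (List String)) : List String :=
  match val with
  | some vs => vs
  | none => [String.ofList [((PySem.Str.pyGet? (wildtype.getD "") (i : Int)).getD ' ')]]

-- the 'for i, val in enumerate(mutations.values())' loop building mutations_
def pvBuildA : List (String × Option (List String)) → Option String → Nat → List (List String)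
  | [], _, _ => []
  | (_, v) :: rest, wt, i => pvSiteA wt i v :: pvBuildA rest wt (i + 1)

-- it.product(*mutations_): first factor outermost
def pvProd : List (List String) → List (List String)
  | [] => [[]]
  | g :: gs => g.flatMap (fun x => (pvProd gs).map (fun s => x :: s))

def mutations_to_genotypes (mutations : List (String × Option (List String))) (wildtype : Option String) : List String :=
  (pvProd (pvBuildA mutations wildtype 0)).map (fun s => PySem.Str.join "" s)

-- ===== PORT B =====
-- the list comprehension with enumerate building 'groups'
def pvGroupsB (mutations : List (String × Option (List String))) (wildtype : Option String) : List (List String) :=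
  mutations.zipIdx.map (fun p =>
    match p.1.2 with
    | some vs => vs
    | none => [String.ofList [((PySem.Str.pyGet? (wildtype.getD "") (p.2 : Int)).getD ' ')]])

-- the 't *= len(h)' / 'total *= len(g)' loop
def pvTotalB (gs : List (List String)) : Nat := gs.foldl (fun t g => t * g.length) 1

-- decode(gs, k): mixed-radix decomposition of rank k, most-significant site first
def pvDecodeB : List (List String) → Nat → String
  | [], _ => ""
  | g :: gs, k =>
    let t := pvTotalB gs
    (g.getD (k / t) "") ++ pvDecodeB gs (k % t)

def mutations_to_genotypes_alt (mutations : List (String × Option (List String))) (wildtype : Option String) : List String :=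
  let groups := pvGroupsB mutations wildtype
  (List.range (pvTotalB groups)).map (pvDecodeB groups)

-- ===== PRECONDITION & SPEC =====
-- Pre_ excludes (a) inputs where some site's value is None but wildtype is missing or too short
-- (Python A raises TypeError/IndexError there, and so does B), and (b) association lists with
-- duplicate keys, which a Python dict cannot represent (the dict collapses them to the last value).
def Pre_mutations_to_genotypes (mutations : List (String × Option (List String))) (wildtype : Option String) : Prop :=
  (mutations.map Prod.fst).Nodup ∧
  ∀ i < mutations.length, (mutations.getD i ("", none)).2 = none → i < (wildtype.getD "").length
instance (mutations : List (String × Option (List String))) (wildtype : Option String) : Decidable (Pre_mutations_to_genotypes mutations wildtype) := by unfold Pre_mutations_to_genotypes; infer_instance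

def pvWitness_mutations_to_genotypes : (List (String × Option (List String))) × Option String :=
  ([("0", some ["A", "C"]), ("1", none)], some "XY")

def Spec_mutations_to_genotypes (mutations : List (String × Option (List String))) (wildtype : Option String) (out : List String) : Prop := out = mutations_to_genotypes_alt mutations wildtype
instance (mutations : List (String × Option (List String))) (wildtype : Option String) (out : List String) : Decidable (Spec_mutations_to_genotypes mutations wildtype out) := by unfold Spec_mutations_to_genotypes; infer_instance

-- ===== CLAIM (what is proved, stated in full; the proofs are below) =====
def Claim_equal_mutations_to_genotypes : Prop := ∀ (mutations : List (String × Option (List String))) (wildtype : Option String), Dom_mutations_to_genotypes mutations wildtype → Pre_mutations_to_genotypes mutations wildtype → Spec_mutations_to_genotypes mutations wildtype (mutations_to_genotypes mutations wildtype)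

-- ===== LEMMAS AND PROOFS =====

theorem pv_join_nil : PySem.Str.join "" [] = "" := by decide

theorem pv_join_cons (x : String) (s : List String) :
    PySem.Str.join "" (x :: s) = x ++ PySem.Str.join "" s := by
  cases s with
  | nil => simp [PySem.Str.join, PySem.Chars.join, List.intercalate]
  | cons y r => simp [PySem.Str.join, PySem.Chars.join, List.intercalate]

-- both per-site stages build the same option lists
theorem pvGroupsB_eq (mutations : List (String × Option (List String))) (wildtype : Option String) :
    ∀ i, (mutations.zipIdx i).map (fun p =>
        match p.1.2 with
        | some vs => vs
        | none => [String.ofList [((PySem.Str.pyGet? (wildtype.getD "") (p.2 : Int)).getD ' ')]])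
      = pvBuildA mutations wildtype i := by
  induction mutations with
  | nil => intro i; simp [pvBuildA]
  | cons hd tl ih =>
      obtain ⟨k, v⟩ := hd
      intro i
      have hz : List.zipIdx ((k, v) :: tl) i = ((k, v), i) :: List.zipIdx tl (i + 1) := rfl
      rw [hz, List.map_cons, ih (i + 1)]
      cases v <;> rfl

theorem pvTotalB_foldl (gs : List (List String)) : ∀ a, gs.foldl (fun t g => t * g.length) a = a * pvTotalB gs := by
  induction gs with
  | nil => intro a; simp [pvTotalB]
  | cons g gs ih =>
      intro a
      simp only [pvTotalB, List.foldl] at *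
      rw [ih (a * g.length), ih (1 * g.length)]
      ring

theorem pvTotalB_cons (g : List String) (gs : List (List String)) :
    pvTotalB (g :: gs) = g.length * pvTotalB gs := by
  have h : pvTotalB (g :: gs) = gs.foldl (fun t g => t * g.length) (1 * g.length) := rfl
  rw [h, pvTotalB_foldl, one_mul]

theorem pvProd_length (gs : List (List String)) : (pvProd gs).length = pvTotalB gs := by
  induction gs with
  | nil => simp [pvProd, pvTotalB]
  | cons g gs ih => simp [pvProd, pvTotalB_cons, ih, mul_comm]

-- range(m*n) as a double loop
theorem pv_range_mul (f : Nat → String) (n : Nat) : ∀ m,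
    (List.range (m * n)).map f
      = (List.range m).flatMap (fun q => (List.range n).map (fun r => f (q * n + r))) := by
  intro m
  induction m with
  | zero => simp
  | succ m ih =>
      rw [Nat.succ_mul, List.range_add, List.map_append, ih, List.range_succ, List.flatMap_append]
      simp

-- iterating a list = iterating its indices
theorem pv_flatMap_range (g : List String) (f : String → List String) :
    g.flatMap f = (List.range g.length).flatMap (fun q => f (g.getD q "")) := by
  induction g with
  | nil => simp
  | cons x xs ih =>
      rw [List.flatMap_cons, List.length_cons, List.range_succ_eq_map, List.flatMap_cons]
      simp only [List.flatMap_map]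
      rw [ih]
      rfl

-- the heart: rank decoding enumerates exactly the joined Cartesian product, in order
theorem pvDecode_range (gs : List (List String)) :
    (List.range (pvTotalB gs)).map (pvDecodeB gs)
      = (pvProd gs).map (fun s => PySem.Str.join "" s) := by
  induction gs with
  | nil => simp [pvTotalB, pvProd, pvDecodeB, List.range_succ, pv_join_nil]
  | cons g gs ih =>
      by_cases hT : pvTotalB gs = 0
      · have hp : pvProd gs = [] := List.eq_nil_of_length_eq_zero (by rw [pvProd_length]; exact hT)
        simp [pvTotalB_cons, hT, pvProd, hp]
      · have hTpos : 0 < pvTotalB gs := Nat.pos_of_ne_zero hT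
        rw [pvTotalB_cons, pv_range_mul]
        simp only [pvProd, List.map_flatMap]
        rw [pv_flatMap_range g (fun x => ((pvProd gs).map (fun s => x :: s)).map (fun s => PySem.Str.join "" s))]
        refine List.flatMap_congr (fun q hq => ?_)
        have hdec : ∀ r < pvTotalB gs,
            pvDecodeB (g :: gs) (q * pvTotalB gs + r) = (g.getD q "") ++ pvDecodeB gs r := by
          intro r hr
          simp only [pvDecodeB]
          rw [Nat.add_comm (q * pvTotalB gs) r, Nat.add_mul_div_right _ _ hTpos,
              Nat.div_eq_of_lt hr, Nat.add_mul_mod_self_right, Nat.mod_eq_of_lt hr, Nat.zero_add]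
        calc (List.range (pvTotalB gs)).map (fun r => pvDecodeB (g :: gs) (q * pvTotalB gs + r))
            = (List.range (pvTotalB gs)).map (fun r => (g.getD q "") ++ pvDecodeB gs r) := by
              refine List.map_congr_left (fun r hr => hdec r (List.mem_range.mp hr))
          _ = ((List.range (pvTotalB gs)).map (pvDecodeB gs)).map (fun s => (g.getD q "") ++ s) := by
              rw [List.map_map]; rfl
          _ = _ := by rw [ih]; simp [pv_join_cons]

-- ===== VERDICT (by name: the statement is the Claim_ definition above) =====
theorem mutations_to_genotypes_spec : Claim_equal_mutations_to_genotypes := by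
  intro mutations wildtype _ _
  unfold Spec_mutations_to_genotypes mutations_to_genotypes mutations_to_genotypes_alt
  have hg : pvGroupsB mutations wildtype = pvBuildA mutations wildtype 0 := by
    unfold pvGroupsB
    exact pvGroupsB_eq mutations wildtype 0
  rw [hg, pvDecode_range]
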